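-- pv_equiv track=rewrite | github.com/EliottPaq/chess-game | main.py | where_am_i
-- ===== SOURCE A (Python) =====
-- def where_am_i (mouse_pos:list):
--     """
--     we are transforming the mouse_pos in a place in our grid that is readable
--
--     Args:
--         mouse_pos (list): our mouse position [x,y]
--
--     Returns:
--         list: the position of our mouse in the grid [y,x]
--     """
--
--     mouse_x = mouse_pos[0]
--     mouse_y = mouse_pos[1]
--     x = -1
--     y= -1
--     while mouse_x >= 0:
--         x += 1
--         mouse_x -= 75
--     while mouse_y >= 0 :
--         y += 1
--         mouse_y -= 75
--     return [y,x]
-- ===== SOURCE B (Python) =====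
-- def where_am_i(mouse_pos: list):
--     """Closed-form: grid index is the floor quotient by 75, never below -1
--     (the starting value the counting loop in the original begins from)."""
--     mouse_x = mouse_pos[0]
--     mouse_y = mouse_pos[1]
--     return [max(mouse_y // 75, -1), max(mouse_x // 75, -1)]
-- ===== Notes on version B (the rewrite author's own statement) =====
-- stated objective: simpler
-- what changed: Replaces the two counting while-loops (one iteration per 75 pixels) by a closed-form floor division by 75, clamped below at -1, which is exactly the value the loop leaves when the coordinate is negative.
import Mathlib
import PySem

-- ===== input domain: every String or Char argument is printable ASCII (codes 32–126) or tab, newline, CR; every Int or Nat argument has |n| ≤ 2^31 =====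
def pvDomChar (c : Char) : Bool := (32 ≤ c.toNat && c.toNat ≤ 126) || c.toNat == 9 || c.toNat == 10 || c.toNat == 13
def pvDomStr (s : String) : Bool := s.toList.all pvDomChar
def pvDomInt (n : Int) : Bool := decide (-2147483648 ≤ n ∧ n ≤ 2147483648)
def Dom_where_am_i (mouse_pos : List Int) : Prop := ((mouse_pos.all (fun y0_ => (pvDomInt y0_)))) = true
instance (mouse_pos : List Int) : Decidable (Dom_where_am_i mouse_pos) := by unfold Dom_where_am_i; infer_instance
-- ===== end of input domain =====

-- B replaces A's counting while-loops with a closed-form floor division by 75 clamped at -1 (simpler; per-call cost independent of the coordinate).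


-- ===== PORT A =====
-- 'while m >= 0: c += 1; m -= 75' starting from c; returns the final c
def pvCountLoop (m : Int) (c : Int) : Int :=
  if 0 ≤ m then pvCountLoop (m - 75) (c + 1) else c
termination_by (m + 75).toNat
decreasing_by omega

def where_am_i (mouse_pos : List Int) : List Int :=
  -- pyGetD is exact here: Pre_ guarantees length ≥ 2 (Python raises IndexError otherwise)
  let mouse_x := PySem.List.pyGetD mouse_pos 0 0
  let mouse_y := PySem.List.pyGetD mouse_pos 1 0
  let x := pvCountLoop mouse_x (-1)
  let y := pvCountLoop mouse_y (-1)
  [y, x]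

-- ===== PORT B =====
def where_am_i_alt (mouse_pos : List Int) : List Int :=
  let mouse_x := PySem.List.pyGetD mouse_pos 0 0
  let mouse_y := PySem.List.pyGetD mouse_pos 1 0
  [max (PySem.Int.floordiv mouse_y 75) (-1), max (PySem.Int.floordiv mouse_x 75) (-1)]

-- ===== PRECONDITION & SPEC =====
-- Pre_ excludes only lists with fewer than two elements, on which the Python A raises IndexError.
def Pre_where_am_i (mouse_pos : List Int) : Prop := 2 ≤ mouse_pos.length
instance (mouse_pos : List Int) : Decidable (Pre_where_am_i mouse_pos) := by unfold Pre_where_am_i; infer_instance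
def pvWitness_where_am_i : List Int := [190, 40]

def Spec_where_am_i (mouse_pos : List Int) (out : List Int) : Prop := out = where_am_i_alt mouse_pos
instance (mouse_pos : List Int) (out : List Int) : Decidable (Spec_where_am_i mouse_pos out) := by unfold Spec_where_am_i; infer_instance

-- ===== CLAIM (what is proved, stated in full; the proofs are below) =====
def Claim_equal_where_am_i : Prop := ∀ (mouse_pos : List Int), Dom_where_am_i mouse_pos → Pre_where_am_i mouse_pos → Spec_where_am_i mouse_pos (where_am_i mouse_pos)

-- ===== LEMMAS AND PROOFS =====

theorem pvCountLoop_eq (m c : Int) : pvCountLoop m c = c + max (PySem.Int.floordiv m 75 + 1) 0 := by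
  induction m, c using pvCountLoop.induct with
  | case1 m c h ih =>
    rw [pvCountLoop, if_pos h, ih,
      PySem.Int.floordiv_eq_ediv_of_pos (b := 75) (by norm_num),
      PySem.Int.floordiv_eq_ediv_of_pos (b := 75) (by norm_num)]
    omega
  | case2 m c h =>
    rw [pvCountLoop, if_neg h,
      PySem.Int.floordiv_eq_ediv_of_pos (b := 75) (by norm_num)]
    omega

theorem where_am_i_spec : Claim_equal_where_am_i := by
  intro mouse_pos _ _
  unfold Spec_where_am_i where_am_i where_am_i_alt
  simp only [pvCountLoop_eq, List.cons.injEq, and_true]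
  refine ⟨?_, ?_⟩ <;>
    · rw [PySem.Int.floordiv_eq_ediv_of_pos (by norm_num)]; omega
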